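-- pv_equiv track=rewrite | github.com/leoquiroa/DS-A | Applications/Qixe/contiguous_subarrays.py | count_subarrays2
-- ===== SOURCE A (Python) =====
-- def count_subarrays2(arr):
--     n = len(arr)
--     res = [1] * n
--     stack = [-1]
--     #left
--     for i in range(n):
--         while len(stack) > 1 and arr[stack[-1]] < arr[i]:
--             stack.pop()
--         res[i] += i - stack[-1] - 1
--         stack.append(i)
--     #right
--     stack = [n]
--     for i in range(n - 1, -1, -1):
--         while len(stack) > 1 and arr[stack[-1]] < arr[i]:
--             stack.pop()
--         res[i] += stack[-1] - i - 1
--         stack.append(i)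
--     return res
-- ===== SOURCE B (Python) =====
-- def count_subarrays2(arr):
--     n = len(arr)
--     res = []
--     for i in range(n):
--         left = 0
--         j = i - 1
--         while j >= 0 and arr[j] < arr[i]:
--             left += 1
--             j -= 1
--         right = 0
--         j = i + 1
--         while j < n and arr[j] < arr[i]:
--             right += 1
--             j += 1
--         res.append(1 + left + right)
--     return res
-- ===== Notes on version B (the rewrite author's own statement) =====
-- stated objective: simpler
-- what changed: Replaced the two monotonic-stack passes (each maintaining a stack of candidate indices) by a direct per-index expansion: for each i walk left and right while neighbours are strictly smaller and count them; no stack or index bookkeeping remains.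
import Mathlib
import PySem

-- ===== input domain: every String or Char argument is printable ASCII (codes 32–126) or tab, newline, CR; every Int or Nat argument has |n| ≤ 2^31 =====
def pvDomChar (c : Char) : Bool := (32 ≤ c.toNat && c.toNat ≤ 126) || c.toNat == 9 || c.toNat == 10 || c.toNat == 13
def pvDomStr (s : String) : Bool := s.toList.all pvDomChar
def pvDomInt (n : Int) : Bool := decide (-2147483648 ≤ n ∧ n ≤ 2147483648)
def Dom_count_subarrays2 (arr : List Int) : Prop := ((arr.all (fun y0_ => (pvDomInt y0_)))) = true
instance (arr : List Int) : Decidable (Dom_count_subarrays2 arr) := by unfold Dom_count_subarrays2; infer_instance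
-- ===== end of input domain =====

-- B replaces A's two monotonic-stack passes by direct per-index left/right expansion walks: simpler, no stack state (not faster).


-- ===== PORT A =====
-- 'while len(stack) > 1 and arr[stack[-1]] < arr[i]: stack.pop()' (list head = Python stack[-1];
-- every stacked index except the sentinel is in range, so pyGetD is exact there)
def popLoopA (arr : List Int) (x : Int) : List Int → List Int
  | s :: s' :: rest =>
      if PySem.List.pyGetD arr s 0 < x then popLoopA arr x (s' :: rest) else s :: s' :: rest
  | stack => stack

-- body of the left 'for i in range(n)' loop; state = (res, stack); stack is never empty, so headD never defaults
def stepLA (arr : List Int) (st : List Int × List Int) (i : Nat) : List Int × List Int :=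
  let stack := popLoopA arr (PySem.List.pyGetD arr (i : Int) 0) st.2
  (st.1.set i (PySem.List.pyGetD st.1 (i : Int) 0 + ((i : Int) - stack.headD 0 - 1)), (i : Int) :: stack)

-- body of the right loop 'for i in range(n-1, -1, -1)' (its indices are the naturals n-1..0, folded in that order)
def stepRA (arr : List Int) (st : List Int × List Int) (i : Nat) : List Int × List Int :=
  let stack := popLoopA arr (PySem.List.pyGetD arr (i : Int) 0) st.2
  (st.1.set i (PySem.List.pyGetD st.1 (i : Int) 0 + (stack.headD 0 - (i : Int) - 1)), (i : Int) :: stack)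

def count_subarrays2 (arr : List Int) : List Int :=
  let n := arr.length
  let res0 : List Int := List.replicate n 1          -- res = [1] * n
  let l := (List.range n).foldl (stepLA arr) (res0, [-1])
  let r := ((List.range n).reverse).foldl (stepRA arr) (l.1, [(n : Int)])
  r.1

-- ===== PORT B =====
-- 'while j >= 0 and arr[j] < arr[i]: left += 1; j -= 1'  (argument k = j + 1, so k = 0 is j = -1)
def walkL (arr : List Int) (x : Int) : Nat → Int
  | 0 => 0
  | k + 1 => if PySem.List.pyGetD arr (k : Int) 0 < x then walkL arr x k + 1 else 0

-- 'while j < n and arr[j] < arr[i]: right += 1; j += 1'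
def walkR (arr : List Int) (x : Int) (j : Nat) : Int :=
  if j < arr.length then
    (if PySem.List.pyGetD arr (j : Int) 0 < x then 1 + walkR arr x (j + 1) else 0)
  else 0
termination_by arr.length - j

def count_subarrays2_alt (arr : List Int) : List Int :=
  (List.range arr.length).foldl
    (fun (res : List Int) (i : Nat) =>
      res ++ [1 + walkL arr (PySem.List.pyGetD arr (i : Int) 0) i
                + walkR arr (PySem.List.pyGetD arr (i : Int) 0) (i + 1)]) []

-- ===== PRECONDITION & SPEC =====
def Spec_count_subarrays2 (arr : List Int) (out : List Int) : Prop := out = count_subarrays2_alt arr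
instance (arr : List Int) (out : List Int) : Decidable (Spec_count_subarrays2 arr out) := by unfold Spec_count_subarrays2; infer_instance

-- ===== CLAIM (what is proved, stated in full; the proofs are below) =====
def Claim_equal_count_subarrays2 : Prop := ∀ (arr : List Int), Dom_count_subarrays2 arr → Spec_count_subarrays2 arr (count_subarrays2 arr)

-- ===== LEMMAS AND PROOFS =====

-- nearest j < i with arr[j] ≥ x, as an Int (-1 if none): A's left stack top after popping
def nge (arr : List Int) (x : Int) : Nat → Int
  | 0 => -1
  | i + 1 => if PySem.List.pyGetD arr (i : Int) 0 < x then nge arr x i else (i : Int)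

-- nearest j ≥ i with arr[j] ≥ x (n if none): A's right stack top after popping
def ngr (arr : List Int) (x : Int) (i : Nat) : Int :=
  if i < arr.length then
    (if PySem.List.pyGetD arr (i : Int) 0 < x then ngr arr x (i + 1) else (i : Int))
  else (arr.length : Int)
termination_by arr.length - i

-- the left-pass stack after indices 0..i-1 have been processed
def canonL (arr : List Int) : Nat → List Int
  | 0 => [-1]
  | i + 1 => (i : Int) :: popLoopA arr (PySem.List.pyGetD arr (i : Int) 0) (canonL arr i)

-- the right-pass stack after k indices (n-1 down to n-k) have been processed
def canonR (arr : List Int) : Nat → List Int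
  | 0 => [(arr.length : Int)]
  | k + 1 =>
      ((arr.length - 1 - k : Nat) : Int) ::
        popLoopA arr (PySem.List.pyGetD arr ((arr.length - 1 - k : Nat) : Int) 0) (canonR arr k)

theorem popLoopA_ne_nil (arr : List Int) (x : Int) (s : Int) (t : List Int) :
    popLoopA arr x (s :: t) ≠ [] := by
  induction t generalizing s with
  | nil => simp [popLoopA]
  | cons s' rest ih =>
      rw [popLoopA]
      split
      · exact ih s'
      · simp

-- popping with a larger key after popping with a smaller one = popping with the larger one directly
theorem popLoopA_comp (arr : List Int) (x y : Int) (hxy : y ≤ x) (st : List Int) :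
    popLoopA arr x (popLoopA arr y st) = popLoopA arr x st := by
  induction st with
  | nil => simp [popLoopA]
  | cons s t ih =>
      cases t with
      | nil => simp [popLoopA]
      | cons s' rest =>
          by_cases h : PySem.List.pyGetD arr s 0 < y
          · rw [show popLoopA arr y (s :: s' :: rest) = popLoopA arr y (s' :: rest) from by
              rw [popLoopA, if_pos h]]
            rw [ih]
            conv_rhs => rw [popLoopA, if_pos (lt_of_lt_of_le h hxy)]
          · rw [show popLoopA arr y (s :: s' :: rest) = s :: s' :: rest from by
              rw [popLoopA, if_neg h]]

theorem head_popLoopA_canonL (arr : List Int) (i : Nat) (x : Int) :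
    (popLoopA arr x (canonL arr i)).headD 0 = nge arr x i := by
  induction i generalizing x with
  | zero => simp [canonL, popLoopA, nge]
  | succ i ih =>
      rw [canonL]
      have hne : popLoopA arr (PySem.List.pyGetD arr (i : Int) 0) (canonL arr i) ≠ [] := by
        cases h : canonL arr i with
        | nil => cases i <;> simp [canonL] at h
        | cons a t => exact popLoopA_ne_nil arr _ a t
      obtain ⟨s', rest, hS⟩ := List.exists_cons_of_ne_nil hne
      rw [hS, popLoopA]
      split
      · rename_i h
        rw [← hS, popLoopA_comp arr x _ (le_of_lt h), ih, nge, if_pos h]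
      · rename_i h
        rw [nge, if_neg h]
        rfl

theorem head_popLoopA_canonR (arr : List Int) (k : Nat) (hk : k ≤ arr.length) (x : Int) :
    (popLoopA arr x (canonR arr k)).headD 0 = ngr arr x (arr.length - k) := by
  induction k generalizing x with
  | zero =>
      rw [canonR, ngr]
      simp [popLoopA]
  | succ k ih =>
      have hk' : k ≤ arr.length := Nat.le_of_succ_le hk
      have hi : arr.length - 1 - k < arr.length := by omega
      have h1 : arr.length - k = (arr.length - 1 - k) + 1 := by omega
      have h2 : arr.length - (k + 1) = arr.length - 1 - k := by omega
      rw [canonR, h2]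
      have hne : popLoopA arr (PySem.List.pyGetD arr ((arr.length - 1 - k : Nat) : Int) 0) (canonR arr k) ≠ [] := by
        cases h : canonR arr k with
        | nil => cases k <;> simp [canonR] at h
        | cons a t => exact popLoopA_ne_nil arr _ a t
      obtain ⟨s', rest, hS⟩ := List.exists_cons_of_ne_nil hne
      rw [hS, popLoopA]
      split
      · rename_i h
        rw [← hS, popLoopA_comp arr x _ (le_of_lt h), ih hk', h1]
        conv_rhs => rw [ngr]
        rw [if_pos hi, if_pos h]
      · rename_i h
        conv_rhs => rw [ngr]
        rw [if_pos hi, if_neg h]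
        rfl

theorem walkL_eq (arr : List Int) (x : Int) (i : Nat) :
    walkL arr x i = (i : Int) - 1 - nge arr x i := by
  induction i with
  | zero => simp [walkL, nge]
  | succ i ih =>
      rw [walkL, nge]
      split
      · rw [ih]; push_cast; ring
      · push_cast
        ring

theorem walkR_eq (arr : List Int) (x : Int) (j : Nat) (hj : j ≤ arr.length) :
    walkR arr x j = ngr arr x j - (j : Int) := by
  have H : ∀ d j, j ≤ arr.length → arr.length - j = d →
      walkR arr x j = ngr arr x j - (j : Int) := by
    intro d
    induction d with
    | zero =>
        intro j hj hd
        have : j = arr.length := by omega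
        subst this
        rw [walkR, ngr]
        simp
    | succ d ihd =>
        intro j hj hd
        have hjl : j < arr.length := by omega
        rw [walkR, ngr, if_pos hjl, if_pos hjl]
        split
        · rw [ihd (j + 1) (by omega) (by omega)]
          push_cast; ring
        · simp
  exact H (arr.length - j) j hj rfl

-- rewriting one entry of a mapped range
theorem set_map_range {f : Nat → Int} {n m : Nat} (_hm : m < n) (v : Int) :
    ((List.range n).map f).set m v
      = (List.range n).map (fun i => if i = m then v else f i) := by
  apply List.ext_getElem
  · simp
  · intro i h1 h2
    simp only [List.getElem_set, List.getElem_map, List.getElem_range]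
    by_cases h : m = i
    · subst h; simp
    · rw [if_neg h, if_neg (fun hh => h hh.symm)]

-- left-pass invariant: result and stack after the first m iterations
theorem leftFold (arr : List Int) (m : Nat) (hm : m ≤ arr.length) :
    (List.range m).foldl (stepLA arr) (List.replicate arr.length 1, [-1])
      = ((List.range arr.length).map
            (fun (i : Nat) => if i < m then
              1 + ((i : Int) - nge arr (PySem.List.pyGetD arr (i : Int) 0) i - 1) else 1),
         canonL arr m) := by
  induction m with
  | zero =>
      simp only [List.range_zero, List.foldl_nil, canonL, Prod.mk.injEq]
      refine ⟨?_, trivial⟩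
      rw [List.map_congr_left (g := fun _ => (1 : Int))
        (fun i _ => if_neg (Nat.not_lt_zero i))]
      simp
  | succ m ih =>
      have hm' : m ≤ arr.length := Nat.le_of_succ_le hm
      have hmn : m < arr.length := hm
      rw [List.range_succ, List.foldl_append, ih hm']
      simp only [List.foldl_cons, List.foldl_nil]
      unfold stepLA
      dsimp only
      rw [PySem.List.pyGetD_natCast,
        PySem.List.getD_map_range _ _ _ _ hmn]
      rw [head_popLoopA_canonL]
      simp only [Prod.mk.injEq]
      refine ⟨?_, rfl⟩
      rw [if_neg (lt_irrefl m), set_map_range hmn]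
      apply List.map_congr_left
      intro i hi
      simp only [List.mem_range] at hi
      by_cases h : i = m
      · subst h
        rw [if_pos rfl, if_pos (Nat.lt_succ_self i)]
      · rw [if_neg h]
        by_cases h2 : i < m
        · rw [if_pos h2, if_pos (Nat.lt_succ_of_lt h2)]
        · rw [if_neg h2, if_neg (by omega)]

-- right-pass invariant: result and stack after the first k iterations (indices n-1 .. n-k)
theorem rightFold (arr : List Int) (k : Nat) (hk : k ≤ arr.length) :
    (((List.range arr.length).reverse.take k).foldl (stepRA arr)
        ((List.range arr.length).map
            (fun (i : Nat) => 1 + ((i : Int) - nge arr (PySem.List.pyGetD arr (i : Int) 0) i - 1)),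
         [(arr.length : Int)]))
      = ((List.range arr.length).map
            (fun (i : Nat) => 1 + ((i : Int) - nge arr (PySem.List.pyGetD arr (i : Int) 0) i - 1)
              + (if arr.length - k ≤ i then
                  ngr arr (PySem.List.pyGetD arr (i : Int) 0) (i + 1) - (i : Int) - 1 else 0)),
         canonR arr k) := by
  induction k with
  | zero =>
      rw [List.take_zero, List.foldl_nil, canonR]
      simp only [Prod.mk.injEq]
      refine ⟨?_, trivial⟩
      apply List.map_congr_left
      intro i hi
      simp only [List.mem_range] at hi
      rw [if_neg (by omega)]
      ring
  | succ k ih =>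
      have hk' : k ≤ arr.length := Nat.le_of_succ_le hk
      have hkn : k < arr.length := hk
      have hget : (List.range arr.length).reverse[k]? = some (arr.length - 1 - k) := by
        rw [List.getElem?_eq_getElem (by simpa using hkn)]
        simp [List.getElem_reverse]
      rw [List.take_add_one, hget, List.foldl_append, ih hk']
      simp only [Option.toList_some, List.foldl_cons, List.foldl_nil]
      unfold stepRA
      dsimp only
      set i0 : Nat := arr.length - 1 - k with hi0
      have hi0n : i0 < arr.length := by omega
      rw [PySem.List.pyGetD_natCast,
        PySem.List.getD_map_range _ _ _ _ hi0n]
      rw [head_popLoopA_canonR arr k hk']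
      have hnk : arr.length - k = i0 + 1 := by omega
      rw [hnk]
      simp only [Prod.mk.injEq]
      refine ⟨?_, by rw [canonR]⟩
      rw [if_neg (by omega), set_map_range hi0n]
      apply List.map_congr_left
      intro i hi
      simp only [List.mem_range] at hi
      by_cases h : i = i0
      · subst h
        rw [if_pos rfl, if_pos (by omega)]
        ring
      · rw [if_neg h]
        by_cases h2 : i0 + 1 ≤ i
        · rw [if_pos h2, if_pos (by omega)]
        · rw [if_neg h2, if_neg (by omega)]

-- ===== VERDICT (by name: the statement is the Claim_ definition above) =====
theorem count_subarrays2_spec : Claim_equal_count_subarrays2 := by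
  intro arr _
  unfold Spec_count_subarrays2 count_subarrays2 count_subarrays2_alt
  dsimp only
  rw [leftFold arr arr.length le_rfl]
  dsimp only
  have htake : (List.range arr.length).reverse
      = (List.range arr.length).reverse.take arr.length := by
    rw [List.take_of_length_le (by simp)]
  have hmap : ∀ i, i < arr.length →
      (if i < arr.length then
          1 + ((i : Int) - nge arr (PySem.List.pyGetD arr (i : Int) 0) i - 1) else 1)
        = 1 + ((i : Int) - nge arr (PySem.List.pyGetD arr (i : Int) 0) i - 1) := by
    intro i hi; rw [if_pos hi]
  rw [List.map_congr_left (fun i hi => hmap i (List.mem_range.mp hi)), htake,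
    rightFold arr arr.length le_rfl]
  dsimp only
  rw [PySem.List.foldl_append_singleton_eq_map]
  simp only [List.nil_append]
  apply List.map_congr_left
  intro i hi
  simp only [List.mem_range] at hi
  rw [walkL_eq, walkR_eq arr _ (i + 1) (by omega), if_pos (by omega)]
  push_cast
  ring
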